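-- pv_equiv track=rewrite | github.com/GBGreenBravo/PythonCodingTest | BOJ/Silver/23252_블록.py | solve
-- ===== SOURCE A (Python) =====
-- def solve(a, b, c):
--     if (a + 2 * b + 3 * c) % 2 == 1:  # 총면적 합이 홀수라면 불가능
--         return "No"
--
--     while c != 0 and b >= 0 and a > 0:  # c를 먼저 처리해주는 루프; 가장 단순하게 처리해주는 2가지 -> (a, b, c)인 경우와 (a, c)인 경우
--         if b % 2 == 1:  # b의 개수가 홀수라면, (a, b, c) 1번 처리해주기.
--             c -= 1
--             b -= 1
--             a -= 1
--         else:  # b의 개수가 짝수라면, c와 상관없이 처리 가능. 그러므로 (a, c) c번 처리해주기.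
--             a -= c
--             c = 0
--
--     if c > 0 or a < 0 or b < 0:  # c가 다 처리되지 못하거나, a나 b가 음수일 때
--         return "No"
--
--     if (a + 2 * b) % 2 == 1:  # 위 과정을 거치고 남은, a와 b의 합이 홀수인 경우.
--         return "No"
--
--     if a == 0 and b % 2 == 1:  # 위 과정을 거치고 남은 게, 0/1/0 인 경우 (b블록 회전 불가능하기 때문)
--         return "No"
--
--     return "Yes"
-- ===== SOURCE B (Python) =====
-- def solve(a, b, c):
--     # Closed-form decision: total area parity, then whether the c-blocks
--     # can be absorbed by a-blocks, then the leftover a/b case.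
--     if (a + c) % 2 == 1:
--         return "No"
--     if c > 0:
--         return "Yes" if a >= c and b >= 0 else "No"
--     return "Yes" if a >= 0 and b >= 0 and not (a == 0 and b % 2 == 1) else "No"
-- ===== Notes on version B (the rewrite author's own statement) =====
-- stated objective: simpler
-- what changed: Replaces the while-loop simulation that consumes c-blocks against a-blocks with a direct closed-form arithmetic condition (parity of a+c, then a>=c when c>0, then the leftover a/b corner), no loop at all.
import Mathlib
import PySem

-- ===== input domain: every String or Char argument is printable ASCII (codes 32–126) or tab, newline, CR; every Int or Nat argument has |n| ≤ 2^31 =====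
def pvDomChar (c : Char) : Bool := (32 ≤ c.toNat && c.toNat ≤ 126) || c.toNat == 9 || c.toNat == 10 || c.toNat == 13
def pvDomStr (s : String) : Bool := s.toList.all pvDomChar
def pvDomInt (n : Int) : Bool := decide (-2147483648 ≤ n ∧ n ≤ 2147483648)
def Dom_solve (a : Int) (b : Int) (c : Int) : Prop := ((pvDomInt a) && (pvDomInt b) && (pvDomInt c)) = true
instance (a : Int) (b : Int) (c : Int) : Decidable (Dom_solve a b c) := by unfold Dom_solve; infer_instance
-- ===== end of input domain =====

-- B replaces A's while-loop simulation with a loop-free closed-form arithmetic decision; objective: simpler.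


-- ===== PORT A =====
-- the while loop of A; each iteration either makes b even (odd branch) or sets c to 0
-- (even branch), so it terminates, measured by (c ≠ 0) and the parity of b
def solveLoop (a : Int) (b : Int) (c : Int) : Int × Int × Int :=
  if c ≠ 0 ∧ b ≥ 0 ∧ a > 0 then
    if PySem.Int.mod b 2 = 1 then solveLoop (a - 1) (b - 1) (c - 1)
    else solveLoop (a - c) b 0
  else (a, b, c)
termination_by (if c = 0 then 0 else 2) + (if PySem.Int.mod b 2 = 1 then 1 else 0)
decreasing_by
  · have h1 : PySem.Int.mod b 2 = b % 2 := PySem.Int.mod_eq_emod_of_pos (by norm_num)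
    have h2 : PySem.Int.mod (b - 1) 2 = (b - 1) % 2 := PySem.Int.mod_eq_emod_of_pos (by norm_num)
    split_ifs with hc hb <;> omega
  · split_ifs with hc <;> omega

def solve (a : Int) (b : Int) (c : Int) : String :=
  if PySem.Int.mod (a + 2 * b + 3 * c) 2 = 1 then "No"
  else
    let s := solveLoop a b c
    if s.2.2 > 0 ∨ s.1 < 0 ∨ s.2.1 < 0 then "No"
    else if PySem.Int.mod (s.1 + 2 * s.2.1) 2 = 1 then "No"
    else if s.1 = 0 ∧ PySem.Int.mod s.2.1 2 = 1 then "No"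
    else "Yes"

-- ===== PORT B =====
def solve_alt (a : Int) (b : Int) (c : Int) : String :=
  if PySem.Int.mod (a + c) 2 = 1 then "No"
  else if c > 0 then (if a ≥ c ∧ b ≥ 0 then "Yes" else "No")
  else if a ≥ 0 ∧ b ≥ 0 ∧ ¬(a = 0 ∧ PySem.Int.mod b 2 = 1) then "Yes" else "No"

-- ===== PRECONDITION & SPEC =====
def Spec_solve (a : Int) (b : Int) (c : Int) (out : String) : Prop := out = solve_alt a b c
instance (a : Int) (b : Int) (c : Int) (out : String) : Decidable (Spec_solve a b c out) := by unfold Spec_solve; infer_instance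

-- ===== CLAIM (what is proved, stated in full; the proofs are below) =====
def Claim_equal_solve : Prop := ∀ (a : Int) (b : Int) (c : Int), Dom_solve a b c → Spec_solve a b c (solve a b c)

-- ===== LEMMAS AND PROOFS =====
theorem pvMod2 (x : Int) : PySem.Int.mod x 2 = x % 2 :=
  PySem.Int.mod_eq_emod_of_pos (by norm_num)

-- the loop runs at most two iterations; its full unrolling
theorem solveLoop_eq (a b c : Int) :
    solveLoop a b c =
      if c ≠ 0 ∧ b ≥ 0 ∧ a > 0 then
        if b % 2 = 1 then
          if c - 1 ≠ 0 ∧ b - 1 ≥ 0 ∧ a - 1 > 0 then (a - c, b - 1, 0)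
          else (a - 1, b - 1, c - 1)
        else (a - c, b, 0)
      else (a, b, c) := by
  rw [solveLoop]
  simp only [pvMod2]
  split_ifs with h1 h2 h3
  · rw [solveLoop]
    simp only [pvMod2]
    have : ¬ ((b - 1) % 2 = 1) := by omega
    rw [if_pos h3, if_neg this, solveLoop]
    have : ¬ ((0:Int) ≠ 0 ∧ b - 1 ≥ 0 ∧ a - 1 - (c - 1) > 0) := by omega
    rw [if_neg this]
    have : a - 1 - (c - 1) = a - c := by omega
    rw [this]
  · rw [solveLoop]
    rw [if_neg h3]
  · rw [solveLoop]
    have : ¬ ((0:Int) ≠ 0 ∧ b ≥ 0 ∧ a - c > 0) := by omega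
    rw [if_neg this]
  · rfl

-- ===== VERDICT (by name: the statement is the Claim_ definition above) =====
theorem solve_spec : Claim_equal_solve := by
  intro a b c _
  unfold Spec_solve solve solve_alt
  simp only [solveLoop_eq, pvMod2]
  split_ifs <;> (try dsimp only at *) <;> first | rfl | omega
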